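-- pv_equiv track=rewrite | github.com/Killazius/faceit_stats | services/services.py | next_level
-- ===== SOURCE A (Python) =====
-- def next_level(level: int, elo: int) -> str:
--
--     elo_thresholds = [500, 750, 900, 1050, 1200, 1350, 1530, 1750, 2000]
--
--     next_threshold = next((threshold for threshold in elo_thresholds if elo <= threshold), None)
--
--     if next_threshold is not None:
--         need_elo = next_threshold + 1 - elo
--         return f'До следующего уровня <b>({level+1})</b> осталось <b>{need_elo}</b> elo'
--     else:
--         return 'Игрок достиг максимального level на FACEIT'
-- ===== SOURCE B (Python) =====
-- import bisect
--
-- def next_level(level: int, elo: int) -> str: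
--     elo_thresholds = [500, 750, 900, 1050, 1200, 1350, 1530, 1750, 2000]
--     i = bisect.bisect_left(elo_thresholds, elo)
--     if i < len(elo_thresholds):
--         need_elo = elo_thresholds[i] + 1 - elo
--         return f'До следующего уровня <b>({level+1})</b> осталось <b>{need_elo}</b> elo'
--     return 'Игрок достиг максимального level на FACEIT'
-- ===== Notes on version B (the rewrite author's own statement) =====
-- stated objective: idiomatic
-- what changed: Replaces the linear next(...) generator scan over the threshold table with bisect.bisect_left binary search for the first threshold >= elo.
import Mathlib
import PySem

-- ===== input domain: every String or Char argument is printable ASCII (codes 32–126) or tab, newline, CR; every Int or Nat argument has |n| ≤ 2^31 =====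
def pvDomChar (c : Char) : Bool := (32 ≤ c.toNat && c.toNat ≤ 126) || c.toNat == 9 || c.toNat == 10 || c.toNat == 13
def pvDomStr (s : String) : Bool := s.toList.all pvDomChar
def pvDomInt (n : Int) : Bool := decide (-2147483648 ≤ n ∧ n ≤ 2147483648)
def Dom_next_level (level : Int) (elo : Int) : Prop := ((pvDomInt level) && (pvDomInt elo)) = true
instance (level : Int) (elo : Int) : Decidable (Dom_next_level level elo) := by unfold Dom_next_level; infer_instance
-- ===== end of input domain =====

-- B replaces A's linear next(...) scan of the threshold table by bisect_left binary search (idiomatic); same value everywhere.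

-- ===== PORT A =====
def next_level (level : Int) (elo : Int) : String :=
  let elo_thresholds : List Int := [500, 750, 900, 1050, 1200, 1350, 1530, 1750, 2000]
  match elo_thresholds.find? (fun threshold => elo ≤ threshold) with
  | some next_threshold =>
      let need_elo := next_threshold + 1 - elo
      "До следующего уровня <b>(" ++ PySem.Int.toStr (level + 1) ++ ")</b> осталось <b>"
        ++ PySem.Int.toStr need_elo ++ "</b> elo"
  | none => "Игрок достиг максимального level на FACEIT"

-- ===== PORT B =====
-- bisect.bisect_left on a list of ints (the standard while lo < hi loop); exact
def pyBisectLeft (xs : List Int) (x : Int) (lo hi : Nat) : Nat :=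
  if lo < hi then
    let mid := (lo + hi) / 2
    if xs.getD mid 0 < x then pyBisectLeft xs x (mid + 1) hi
    else pyBisectLeft xs x lo mid
  else lo
termination_by hi - lo
decreasing_by all_goals omega

def next_level_alt (level : Int) (elo : Int) : String :=
  let elo_thresholds : List Int := [500, 750, 900, 1050, 1200, 1350, 1530, 1750, 2000]
  let i := pyBisectLeft elo_thresholds elo 0 elo_thresholds.length
  if i < elo_thresholds.length then
    let need_elo := elo_thresholds.getD i 0 + 1 - elo
    "До следующего уровня <b>(" ++ PySem.Int.toStr (level + 1) ++ ")</b> осталось <b>"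
      ++ PySem.Int.toStr need_elo ++ "</b> elo"
  else "Игрок достиг максимального level на FACEIT"

-- ===== PRECONDITION & SPEC =====
def Spec_next_level (level : Int) (elo : Int) (out : String) : Prop := out = next_level_alt level elo
instance (level : Int) (elo : Int) (out : String) : Decidable (Spec_next_level level elo out) := by unfold Spec_next_level; infer_instance

-- ===== CLAIM (what is proved, stated in full; the proofs are below) =====
def Claim_equal_next_level : Prop := ∀ (level : Int) (elo : Int), Dom_next_level level elo → Spec_next_level level elo (next_level level elo)

-- ===== LEMMAS AND PROOFS =====

-- ===== VERDICT (by name: the statement is the Claim_ definition above) =====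
theorem next_level_spec : Claim_equal_next_level := by
  intro level elo _
  unfold Spec_next_level next_level next_level_alt
  by_cases h0 : elo ≤ 500
  · simp [pyBisectLeft, List.find?, show elo ≤ (500:Int) by omega, show ¬((1200:Int) < elo) by omega, show ¬((900:Int) < elo) by omega, show ¬((750:Int) < elo) by omega, show ¬((500:Int) < elo) by omega]
  by_cases h1 : elo ≤ 750
  · simp [pyBisectLeft, List.find?, show ¬(elo ≤ (500:Int)) by omega, show elo ≤ (750:Int) by omega, show ¬((1200:Int) < elo) by omega, show ¬((900:Int) < elo) by omega, show ¬((750:Int) < elo) by omega, show (500:Int) < elo by omega]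
  by_cases h2 : elo ≤ 900
  · simp [pyBisectLeft, List.find?, show ¬(elo ≤ (500:Int)) by omega, show ¬(elo ≤ (750:Int)) by omega, show elo ≤ (900:Int) by omega, show ¬((1200:Int) < elo) by omega, show ¬((900:Int) < elo) by omega, show (750:Int) < elo by omega]
  by_cases h3 : elo ≤ 1050
  · simp [pyBisectLeft, List.find?, show ¬(elo ≤ (500:Int)) by omega, show ¬(elo ≤ (750:Int)) by omega, show ¬(elo ≤ (900:Int)) by omega, show elo ≤ (1050:Int) by omega, show ¬((1200:Int) < elo) by omega, show (900:Int) < elo by omega, show ¬((1050:Int) < elo) by omega]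
  by_cases h4 : elo ≤ 1200
  · simp [pyBisectLeft, List.find?, show ¬(elo ≤ (500:Int)) by omega, show ¬(elo ≤ (750:Int)) by omega, show ¬(elo ≤ (900:Int)) by omega, show ¬(elo ≤ (1050:Int)) by omega, show elo ≤ (1200:Int) by omega, show ¬((1200:Int) < elo) by omega, show (900:Int) < elo by omega, show (1050:Int) < elo by omega]
  by_cases h5 : elo ≤ 1350
  · simp [pyBisectLeft, List.find?, show ¬(elo ≤ (500:Int)) by omega, show ¬(elo ≤ (750:Int)) by omega, show ¬(elo ≤ (900:Int)) by omega, show ¬(elo ≤ (1050:Int)) by omega, show ¬(elo ≤ (1200:Int)) by omega, show elo ≤ (1350:Int) by omega, show (1200:Int) < elo by omega, show ¬((1750:Int) < elo) by omega, show ¬((1530:Int) < elo) by omega, show ¬((1350:Int) < elo) by omega]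
  by_cases h6 : elo ≤ 1530
  · simp [pyBisectLeft, List.find?, show ¬(elo ≤ (500:Int)) by omega, show ¬(elo ≤ (750:Int)) by omega, show ¬(elo ≤ (900:Int)) by omega, show ¬(elo ≤ (1050:Int)) by omega, show ¬(elo ≤ (1200:Int)) by omega, show ¬(elo ≤ (1350:Int)) by omega, show elo ≤ (1530:Int) by omega, show (1200:Int) < elo by omega, show ¬((1750:Int) < elo) by omega, show ¬((1530:Int) < elo) by omega, show (1350:Int) < elo by omega]
  by_cases h7 : elo ≤ 1750
  · simp [pyBisectLeft, List.find?, show ¬(elo ≤ (500:Int)) by omega, show ¬(elo ≤ (750:Int)) by omega, show ¬(elo ≤ (900:Int)) by omega, show ¬(elo ≤ (1050:Int)) by omega, show ¬(elo ≤ (1200:Int)) by omega, show ¬(elo ≤ (1350:Int)) by omega, show ¬(elo ≤ (1530:Int)) by omega, show elo ≤ (1750:Int) by omega, show (1200:Int) < elo by omega, show ¬((1750:Int) < elo) by omega, show (1530:Int) < elo by omega]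
  by_cases h8 : elo ≤ 2000
  · simp [pyBisectLeft, List.find?, show ¬(elo ≤ (500:Int)) by omega, show ¬(elo ≤ (750:Int)) by omega, show ¬(elo ≤ (900:Int)) by omega, show ¬(elo ≤ (1050:Int)) by omega, show ¬(elo ≤ (1200:Int)) by omega, show ¬(elo ≤ (1350:Int)) by omega, show ¬(elo ≤ (1530:Int)) by omega, show ¬(elo ≤ (1750:Int)) by omega, show elo ≤ (2000:Int) by omega, show (1200:Int) < elo by omega, show (1750:Int) < elo by omega, show ¬((2000:Int) < elo) by omega]
  · simp [pyBisectLeft, List.find?, show ¬(elo ≤ (500:Int)) by omega, show ¬(elo ≤ (750:Int)) by omega, show ¬(elo ≤ (900:Int)) by omega, show ¬(elo ≤ (1050:Int)) by omega, show ¬(elo ≤ (1200:Int)) by omega, show ¬(elo ≤ (1350:Int)) by omega, show ¬(elo ≤ (1530:Int)) by omega, show ¬(elo ≤ (1750:Int)) by omega, show ¬(elo ≤ (2000:Int)) by omega, show (1200:Int) < elo by omega, show (1750:Int) < elo by omega, show (2000:Int) < elo by omega]
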